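-- pv_equiv track=rewrite | github.com/maurimorero/untitled | 22.py | IsCasiPalindromo
-- ===== SOURCE A (Python) =====
-- def IsCasiPalindromo (texto):
--     # invierto el orden de la palabra para hacer comparación
--     contador = len(texto)
--     aux = ""
--     indx = -1
--     while contador >= 1:
--         aux += texto[indx]
--         indx -= 1
--         contador -= 1
--     palabraalreves=aux
--     indx = 0
--     contador = 0
--
--     bandera=1 # esta bandera la uso para contemplar el caso en que haya solo una letra de diferencia (lo cual implica dos diferencias en la comparación)
--
--     for i in range (len(texto)):
--         if palabraalreves[indx] == texto[indx]:
--             indx += 1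
--             contador += 1
--         else:
--             if bandera>=0: # chequeo cantidad de diferencias
--                 bandera-=1
--                 indx += 1
--                 contador += 1
--             else:
--                 return False
--
--     if contador == len(texto): # en caso de que el contador sea igual a la cantidad de letras de la cadena se recorrio el string y es igual (o tiene una letra de diferencia)
--         return True
-- ===== SOURCE B (Python) =====
-- def IsCasiPalindromo(texto):
--     n = len(texto)
--     diffs = 0
--     for i in range(n // 2):
--         if texto[i] != texto[n - 1 - i]:
--             diffs += 1
--             if diffs > 1:
--                 return False
--     return True
-- ===== Notes on version B (the rewrite author's own statement) =====
-- stated objective: faster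
-- what changed: Replaces the hand-built reversed string (quadratic repeated string concatenation) plus full-length flag-driven comparison with a single two-pointer scan over the first half counting differing symmetric pairs (threshold 1, since each differing pair shows up twice in A's full scan).
import Mathlib
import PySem

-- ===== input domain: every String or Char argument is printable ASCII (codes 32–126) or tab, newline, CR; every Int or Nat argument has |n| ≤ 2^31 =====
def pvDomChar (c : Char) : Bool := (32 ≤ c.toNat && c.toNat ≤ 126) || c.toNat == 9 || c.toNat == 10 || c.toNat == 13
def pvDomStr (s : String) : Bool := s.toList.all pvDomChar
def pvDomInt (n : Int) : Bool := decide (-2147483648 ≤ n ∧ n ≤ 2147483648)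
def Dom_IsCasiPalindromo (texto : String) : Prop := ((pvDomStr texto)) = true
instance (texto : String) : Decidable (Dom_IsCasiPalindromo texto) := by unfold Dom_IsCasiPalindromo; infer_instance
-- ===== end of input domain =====

-- B replaces A's hand-built reversed string + full-length flag-driven comparison with a
-- single two-pointer scan over the first half counting differing symmetric pairs; measurably faster (A's reverse loop is quadratic string concatenation).

-- ===== PORT A =====
-- while contador >= 1: aux += texto[indx]; indx -= 1; contador -= 1
-- (texto[indx] is always in range here, so the `none` arm of pyGet? is unreachable; Option.toList appends the char)
def pvRevLoop (texto : List Char) (contador : Nat) (indx : Int) (aux : List Char) : List Char :=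
  match contador with
  | 0 => aux
  | c + 1 => pvRevLoop texto c (indx - 1) (aux ++ (PySem.List.pyGet? texto indx).toList)

-- for i in range(len(texto)): … ; the fuel is the number of remaining iterations
-- (after the loop Python tests `contador == len(texto)`; its implicit-None branch is unreachable, ported as false)
def pvForLoop (rev texto : List Char) : Nat → Int → Int → Int → Bool
  | 0, _indx, contador, _bandera =>
      if contador = (texto.length : Int) then true else false
  | k + 1, indx, contador, bandera =>
      if PySem.List.pyGet? rev indx = PySem.List.pyGet? texto indx then
        pvForLoop rev texto k (indx + 1) (contador + 1) bandera
      else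
        if bandera ≥ 0 then
          pvForLoop rev texto k (indx + 1) (contador + 1) (bandera - 1)
        else
          false

def IsCasiPalindromo (texto : String) : Bool :=
  let l := texto.toList
  let palabraalreves := pvRevLoop l l.length (-1) []
  pvForLoop palabraalreves l l.length 0 0 1

-- ===== PORT B =====
-- for i in range(n // 2): if texto[i] != texto[n-1-i]: diffs += 1; if diffs > 1: return False
def pvPairLoop (l : List Char) (n : Nat) : Nat → Nat → Nat → Bool
  | 0, _i, _diffs => true
  | k + 1, i, diffs =>
      if PySem.List.pyGet? l (i : Int) ≠ PySem.List.pyGet? l ((n : Int) - 1 - (i : Int)) then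
        if diffs + 1 > 1 then false
        else pvPairLoop l n k (i + 1) (diffs + 1)
      else pvPairLoop l n k (i + 1) diffs

def IsCasiPalindromo_alt (texto : String) : Bool :=
  let l := texto.toList
  let n := l.length
  pvPairLoop l n (n / 2) 0 0

-- ===== PRECONDITION & SPEC =====
def Spec_IsCasiPalindromo (texto : String) (out : Bool) : Prop := out = IsCasiPalindromo_alt texto
instance (texto : String) (out : Bool) : Decidable (Spec_IsCasiPalindromo texto out) := by unfold Spec_IsCasiPalindromo; infer_instance

-- ===== CLAIM (what is proved, stated in full; the proofs are below) =====
def Claim_equal_IsCasiPalindromo : Prop := ∀ (texto : String), Dom_IsCasiPalindromo texto → Spec_IsCasiPalindromo texto (IsCasiPalindromo texto)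

-- ===== LEMMAS AND PROOFS =====

-- mismatch indicator at position i (against the mirrored position), and its running count
def pvMis (l : List Char) (n i : Nat) : Bool :=
  decide (PySem.List.pyGet? l (i : Int) ≠ PySem.List.pyGet? l ((n : Int) - 1 - (i : Int)))

def pvCnt (l : List Char) (n : Nat) : Nat → Nat → Nat
  | _, 0 => 0
  | i, k + 1 => (if pvMis l n i then 1 else 0) + pvCnt l n (i + 1) k

lemma pvRevLoop_eq (l : List Char) :
    ∀ (c : Nat) (aux : List Char), c ≤ l.length →
      pvRevLoop l c (-(((l.length - c : Nat) : Int) + 1)) aux = aux ++ (l.take c).reverse := by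
  intro c
  induction c with
  | zero => intro aux _; simp [pvRevLoop]
  | succ c ih =>
    intro aux hc
    have hlt : c < l.length := by omega
    have h1 : (-(((l.length - (c+1) : Nat) : Int) + 1)) = -((l.length - c : Nat) : Int) := by
      omega
    have h2 : (-((l.length - c : Nat) : Int)) - 1 = -(((l.length - c : Nat) : Int) + 1) := by ring
    have hget : PySem.List.pyGet? l (-((l.length - c : Nat) : Int)) = some l[c] := by
      rw [PySem.List.pyGet?_neg_natCast l (l.length - c) (by omega) (by omega)]
      rw [show l.length - (l.length - c) = c from by omega]
      exact List.getElem?_eq_getElem hlt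
    rw [pvRevLoop, h1, hget, h2, ih _ (by omega),
        show List.take (c+1) l = (List.take c l).concat l[c] from (List.take_concat_get (h := hlt)).symm]
    simp only [Option.toList, List.concat_eq_append, List.reverse_append, List.reverse_cons,
      List.reverse_nil, List.nil_append, List.cons_append, List.append_assoc]

lemma pvRev_get (l : List Char) (i : Nat) (hi : i < l.length) :
    PySem.List.pyGet? l.reverse (i : Int) = PySem.List.pyGet? l ((l.length : Int) - 1 - (i : Int)) := by
  have h : ((l.length : Int) - 1 - (i : Int)) = ((l.length - 1 - i : Nat) : Int) := by omega
  rw [h, PySem.List.pyGet?_natCast, PySem.List.pyGet?_natCast]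
  rw [List.getElem?_eq_getElem (by simpa using hi),
      List.getElem?_eq_getElem (show l.length - 1 - i < l.length by omega)]
  simp [List.getElem_reverse]

lemma pvForLoop_char (l : List Char) :
    ∀ (k i : Nat) (b : Int), i + k = l.length → -1 ≤ b →
      pvForLoop l.reverse l k (i : Int) (i : Int) b = decide ((pvCnt l l.length i k : Int) ≤ b + 1) := by
  intro k
  induction k with
  | zero =>
    intro i b hik hb
    rw [pvForLoop, if_pos (by exact_mod_cast congrArg (Nat.cast (R := Int)) hik)]
    symm
    rw [decide_eq_true_eq]
    simp only [pvCnt]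
    push_cast
    omega
  | succ k ih =>
    intro i b hik hb
    have hi : i < l.length := by omega
    have hcast : (i : Int) + 1 = ((i + 1 : Nat) : Int) := by push_cast; ring
    rw [pvForLoop, pvRev_get l i hi]
    by_cases hm : PySem.List.pyGet? l (i : Int) = PySem.List.pyGet? l ((l.length : Int) - 1 - (i : Int))
    · rw [if_pos hm.symm, hcast, ih (i+1) b (by omega) hb]
      have hmis : pvMis l l.length i = false := by
        simp only [pvMis, decide_eq_false_iff_not, not_not]; exact hm
      simp [pvCnt, hmis]
    · rw [if_neg (fun h => hm h.symm)]
      have hmis : pvMis l l.length i = true := by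
        simp only [pvMis, decide_eq_true_eq, ne_eq]; exact hm
      by_cases hb0 : b ≥ 0
      · rw [if_pos hb0, hcast, ih (i+1) (b-1) (by omega) (by omega)]
        simp only [pvCnt, hmis, if_true]
        rw [decide_eq_decide]; push_cast; omega
      · rw [if_neg hb0]
        have : ¬ ((pvCnt l l.length i (k+1) : Int) ≤ b + 1) := by
          simp only [pvCnt, hmis, if_true]
          push_cast; omega
        simp [this]

lemma pvPairLoop_char (l : List Char) (n : Nat) :
    ∀ (k i d : Nat), d ≤ 1 →
      pvPairLoop l n k i d = decide (pvCnt l n i k + d ≤ 1) := by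
  intro k
  induction k with
  | zero => intro i d hd; simp [pvPairLoop, pvCnt]; omega
  | succ k ih =>
    intro i d hd
    rw [pvPairLoop]
    by_cases hm : PySem.List.pyGet? l (i : Int) ≠ PySem.List.pyGet? l ((n : Int) - 1 - (i : Int))
    · rw [if_pos hm]
      have hmis : pvMis l n i = true := by
        simp only [pvMis, decide_eq_true_eq, ne_eq]; exact hm
      by_cases hd1 : d + 1 > 1
      · rw [if_pos hd1]
        have : ¬ (pvCnt l n i (k+1) + d ≤ 1) := by simp only [pvCnt, hmis, if_true]; omega
        simp [this]
      · rw [if_neg hd1, ih (i+1) (d+1) (by omega)]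
        simp only [pvCnt, hmis, if_true]
        rw [decide_eq_decide]; omega
    · rw [if_neg hm, ih (i+1) d hd]
      have hmis : pvMis l n i = false := by
        simp only [pvMis, decide_eq_false_iff_not, not_not, ne_eq, not_not]
        exact not_not.mp hm
      simp [pvCnt, hmis]

lemma pvCnt_eq_sum (l : List Char) (n : Nat) :
    ∀ (k i : Nat), pvCnt l n i k = ∑ j ∈ Finset.range k, (if pvMis l n (i + j) then 1 else 0) := by
  intro k
  induction k with
  | zero => intro i; simp [pvCnt]
  | succ k ih =>
    intro i
    rw [Finset.sum_range_succ', pvCnt, ih (i+1)]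
    simp only [Nat.add_zero]
    rw [Nat.add_comm]
    congr 1
    apply Finset.sum_congr rfl
    intro j _
    rw [show i + (j + 1) = i + 1 + j from by omega]

lemma pvMis_symm (l : List Char) (n j : Nat) (hj : j < n) :
    pvMis l n (n - 1 - j) = pvMis l n j := by
  unfold pvMis
  rw [show ((n - 1 - j : Nat) : Int) = (n : Int) - 1 - (j : Int) from by omega]
  rw [show ((n : Int) - 1 - ((n : Int) - 1 - (j : Int))) = (j : Int) from by ring]
  rw [decide_eq_decide]
  exact ne_comm

lemma pvMis_mid (l : List Char) (n m : Nat) (h : n = 2 * m + 1) :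
    pvMis l n m = false := by
  unfold pvMis
  have : (n : Int) - 1 - (m : Int) = (m : Int) := by omega
  simp [this]

lemma pvCnt_add (l : List Char) (n : Nat) :
    ∀ (a i b : Nat), pvCnt l n i (a + b) = pvCnt l n i a + pvCnt l n (i + a) b := by
  intro a
  induction a with
  | zero => intro i b; simp [pvCnt]
  | succ a ih =>
    intro i b
    have : a + 1 + b = (a + b) + 1 := by omega
    rw [this, pvCnt, pvCnt, ih (i+1) b]
    have : i + 1 + a = i + (a + 1) := by omega
    rw [this]; ring

lemma pvCnt_double (l : List Char) :
    pvCnt l l.length 0 l.length = 2 * pvCnt l l.length 0 (l.length / 2) := by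
  set n := l.length with hn
  set m := n / 2 with hm
  have hsplit : n = m + (n - m) := by omega
  have hrefl : pvCnt l n m (n - m) = pvCnt l n 0 (n - m) := by
    rw [pvCnt_eq_sum, pvCnt_eq_sum]
    rw [← Finset.sum_range_reflect]
    apply Finset.sum_congr rfl
    intro j hj
    have hjlt : j < n - m := Finset.mem_range.mp hj
    have h1 : m + (n - m - 1 - j) = n - 1 - j := by omega
    have h2 : (0 : Nat) + j = j := by omega
    rw [h1, h2, pvMis_symm l n j (by omega)]
  have hmain : pvCnt l n 0 n = pvCnt l n 0 m + pvCnt l n 0 (n - m) := by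
    calc pvCnt l n 0 n = pvCnt l n 0 (m + (n - m)) := by rw [← hsplit]
    _ = pvCnt l n 0 m + pvCnt l n (0 + m) (n - m) := pvCnt_add l n m 0 (n - m)
    _ = pvCnt l n 0 m + pvCnt l n 0 (n - m) := by rw [Nat.zero_add, hrefl]
  rcases Nat.even_or_odd n with he | ho
  · obtain ⟨c, hc⟩ := he
    have hnm : n - m = m := by omega
    rw [hmain, hnm]; ring
  · obtain ⟨c, hc⟩ := ho
    have hcm : m = c := by omega
    have hnm : n - m = m + 1 := by omega
    have hodd : pvCnt l n 0 (n - m) = pvCnt l n 0 m := by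
      rw [hnm, pvCnt_add l n m 0 1, Nat.zero_add]
      have : pvCnt l n m 1 = 0 := by
        simp [pvCnt, pvMis_mid l n m (by omega)]
      omega
    rw [hmain, hodd]; ring

-- ===== VERDICT (by name: the statement is the Claim_ definition above) =====
theorem IsCasiPalindromo_spec : Claim_equal_IsCasiPalindromo := by
  intro texto _
  unfold Spec_IsCasiPalindromo IsCasiPalindromo IsCasiPalindromo_alt
  simp only []
  set l := texto.toList with hl
  have hrev : pvRevLoop l l.length (-1) [] = l.reverse := by
    have := pvRevLoop_eq l l.length [] (le_refl _)
    simpa using this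
  rw [hrev]
  have hA := pvForLoop_char l l.length 0 1 (by omega) (by omega)
  have hB := pvPairLoop_char l l.length (l.length / 2) 0 0 (by omega)
  simp only [Nat.cast_zero] at hA
  rw [hA, hB, decide_eq_decide]
  have := pvCnt_double l
  omega
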